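-- pv_equiv track=rewrite | github.com/Jihyeok11/Weekly-Algorithm | MakeMoneying/Week 4/2.py | solution
-- ===== SOURCE A (Python) =====
-- def solution(M, load):
--     answer = 0
--     load = sorted(load, key = lambda x:x, reverse=True)
--     while load:
--         loads = 0
--         while True:
--             if load and load[0] + loads <= M:
--                 loads += load.pop(0)
--             else:
--                 break
--         while True:
--             if load and load[-1] + loads <= M:
--                 loads += load.pop()
--             else: break
--         answer += 1
--     return answer
-- ===== SOURCE B (Python) =====
-- def solution(M, load):
--     a = sorted(load, reverse=True)
--     i, k = 0, len(a)          # active window is a[i:k]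
--     answer = 0
--     while i < k:
--         loads = 0
--         while i < k and a[i] + loads <= M:
--             loads += a[i]
--             i += 1
--         while i < k and a[k - 1] + loads <= M:
--             loads += a[k - 1]
--             k -= 1
--         answer += 1
--     return answer
-- ===== Notes on version B (the rewrite author's own statement) =====
-- stated objective: alternative
-- what changed: Replaces A's repeated list.pop(0)/pop() mutation (each pop(0) shifts the whole remaining list) by two index pointers sweeping inward over the sorted array, so no element is ever moved after sorting.
import Mathlib
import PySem

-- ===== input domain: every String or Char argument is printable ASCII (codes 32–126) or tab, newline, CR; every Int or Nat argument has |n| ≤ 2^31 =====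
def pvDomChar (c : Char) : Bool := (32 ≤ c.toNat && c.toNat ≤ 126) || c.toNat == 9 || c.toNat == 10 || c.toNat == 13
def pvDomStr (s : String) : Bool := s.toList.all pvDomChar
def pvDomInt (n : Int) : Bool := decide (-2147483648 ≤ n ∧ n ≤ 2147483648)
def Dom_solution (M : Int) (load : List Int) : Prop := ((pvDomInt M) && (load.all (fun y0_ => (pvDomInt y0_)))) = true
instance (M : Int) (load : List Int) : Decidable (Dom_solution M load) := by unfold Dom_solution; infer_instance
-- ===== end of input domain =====

-- B replaces A's repeated pop(0)/pop() list mutation by two index pointers sweeping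
-- inward over the sorted array; no element is ever moved after the sort.

-- ===== PORT A =====
-- inner "while True: if load and load[0] + loads <= M: loads += load.pop(0) else: break"
def frontLoopA (M loads : Int) (l : List Int) : Int × List Int :=
  match l with
  | [] => (loads, [])
  | x :: xs => if x + loads ≤ M then frontLoopA M (loads + x) xs else (loads, x :: xs)

-- inner "while True: if load and load[-1] + loads <= M: loads += load.pop() else: break"
def backLoopA (M loads : Int) (l : List Int) : Int × List Int :=
  match _hl : l.getLast? with
  | none => (loads, l)
  | some x => if x + loads ≤ M then backLoopA M (loads + x) l.dropLast else (loads, l)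
termination_by l.length
decreasing_by
  cases l with
  | nil => simp at _hl
  | cons y ys => simp [List.length_dropLast]

-- outer "while load:". The Python loop makes no progress (diverges) when every remaining
-- element exceeds M; fuel = length makes the port total; whenever every element is ≤ M
-- each iteration removes at least one element, so the fuel is never exhausted early.
def outerA (M : Int) (fuel : Nat) (l : List Int) (answer : Int) : Int :=
  match fuel with
  | 0 => answer
  | Nat.succ f =>
    if l = [] then answer
    else
      let p := frontLoopA M 0 l
      let q := backLoopA M p.1 p.2
      outerA M f q.2 (answer + 1)

def solution (M : Int) (load : List Int) : Int :=
  let l := PySem.List.sorted load (fun x => x) true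
  outerA M l.length l 0

-- ===== PORT B =====
-- "while i < k and a[i] + loads <= M: loads += a[i]; i += 1"
-- (0 ≤ i < k ≤ len a whenever the guard holds, so getD is exact for Python's a[i])
def frontLoopB (M : Int) (a : List Int) (loads : Int) (i k : Nat) : Int × Nat :=
  if i < k ∧ a.getD i 0 + loads ≤ M then
    frontLoopB M a (loads + a.getD i 0) (i + 1) k
  else (loads, i)
termination_by k - i
decreasing_by omega

-- "while i < k and a[k-1] + loads <= M: loads += a[k-1]; k -= 1"
def backLoopB (M : Int) (a : List Int) (loads : Int) (i k : Nat) : Int × Nat :=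
  if i < k ∧ a.getD (k - 1) 0 + loads ≤ M then
    backLoopB M a (loads + a.getD (k - 1) 0) i (k - 1)
  else (loads, k)
termination_by k - i
decreasing_by omega

-- outer "while i < k:", same fuel discipline as A's port (the Python B diverges on
-- exactly the same inputs A does).
def outerB (M : Int) (a : List Int) (fuel : Nat) (i k : Nat) (answer : Int) : Int :=
  match fuel with
  | 0 => answer
  | Nat.succ f =>
    if i < k then
      let p := frontLoopB M a 0 i k
      let q := backLoopB M a p.1 p.2 k
      outerB M a f p.2 q.2 (answer + 1)
    else answer

def solution_alt (M : Int) (load : List Int) : Int :=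
  let a := PySem.List.sorted load (fun x => x) true
  outerB M a a.length 0 a.length 0

-- ===== PRECONDITION & SPEC =====
def Spec_solution (M : Int) (load : List Int) (out : Int) : Prop := out = solution_alt M load
instance (M : Int) (load : List Int) (out : Int) : Decidable (Spec_solution M load out) := by unfold Spec_solution; infer_instance

-- ===== CLAIM (what is proved, stated in full; the proofs are below) =====
def Claim_equal_solution : Prop := ∀ (M : Int) (load : List Int), Dom_solution M load → Spec_solution M load (solution M load)

-- ===== LEMMAS AND PROOFS =====

-- the window a[i:k] that B's indices denote, as the list A's port carries
def seg (a : List Int) (i k : Nat) : List Int := (a.drop i).take (k - i)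

lemma seg_of_ge {a : List Int} {i k : Nat} (h : k ≤ i) : seg a i k = [] := by
  simp [seg, Nat.sub_eq_zero_of_le h]

lemma seg_cons {a : List Int} {i k : Nat} (h1 : i < k) (h2 : k ≤ a.length) :
    seg a i k = a.getD i 0 :: seg a (i + 1) k := by
  have hi : i < a.length := lt_of_lt_of_le h1 h2
  have hd : a.drop i = a[i] :: a.drop (i + 1) := List.drop_eq_getElem_cons hi
  have hk : k - i = (k - (i + 1)) + 1 := by omega
  rw [seg, hk, hd, List.take_succ_cons, seg,
    List.getD_eq_getElem?_getD, List.getElem?_eq_getElem hi, Option.getD_some]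

lemma seg_snoc {a : List Int} {i k : Nat} (h1 : i < k) (h2 : k ≤ a.length) :
    seg a i k = seg a i (k - 1) ++ [a.getD (k - 1) 0] := by
  have hk1 : k - 1 < a.length := by omega
  have hlen : k - 1 - i < (a.drop i).length := by simp [List.length_drop]; omega
  have hk : k - i = (k - 1 - i) + 1 := by omega
  have hget : (a.drop i)[k - 1 - i]'hlen = a[k - 1]'hk1 := by
    rw [List.getElem_drop]; congr 1; omega
  calc seg a i k = (a.drop i).take ((k - 1 - i) + 1) := by rw [seg, hk]
    _ = (a.drop i).take (k - 1 - i) ++ [(a.drop i)[k - 1 - i]'hlen] := by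
        rw [List.take_add_one, List.getElem?_eq_getElem hlen]; rfl
    _ = seg a i (k - 1) ++ [a.getD (k - 1) 0] := by
        rw [seg, hget, List.getD_eq_getElem?_getD, List.getElem?_eq_getElem hk1, Option.getD_some]

lemma frontLoopB_bounds (M : Int) (a : List Int) :
    ∀ n i k loads, k - i ≤ n → i ≤ k →
      i ≤ (frontLoopB M a loads i k).2 ∧ (frontLoopB M a loads i k).2 ≤ k := by
  intro n
  induction n with
  | zero =>
    intro i k loads hn hik
    rw [frontLoopB]; split
    · rename_i hc; exact absurd hc.1 (by omega)
    · exact ⟨le_rfl, hik⟩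
  | succ m ih =>
    intro i k loads hn hik
    rw [frontLoopB]; split
    · rename_i hc
      have := ih (i + 1) k (loads + a.getD i 0) (by omega) (by omega)
      exact ⟨le_trans (by omega) this.1, this.2⟩
    · exact ⟨le_rfl, hik⟩

lemma backLoopB_bounds (M : Int) (a : List Int) :
    ∀ n i k loads, k - i ≤ n → i ≤ k →
      i ≤ (backLoopB M a loads i k).2 ∧ (backLoopB M a loads i k).2 ≤ k := by
  intro n
  induction n with
  | zero =>
    intro i k loads hn hik
    rw [backLoopB]; split
    · rename_i hc; exact absurd hc.1 (by omega)
    · exact ⟨hik, le_rfl⟩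
  | succ m ih =>
    intro i k loads hn hik
    rw [backLoopB]; split
    · rename_i hc
      have := ih i (k - 1) (loads + a.getD (k - 1) 0) (by omega) (by omega)
      exact ⟨this.1, le_trans this.2 (by omega)⟩
    · exact ⟨hik, le_rfl⟩

lemma front_eq (M : Int) (a : List Int) :
    ∀ n i k loads, k ≤ a.length → k - i ≤ n →
      frontLoopA M loads (seg a i k) =
        ((frontLoopB M a loads i k).1, seg a (frontLoopB M a loads i k).2 k) := by
  intro n
  induction n with
  | zero =>
    intro i k loads hk hn
    have hik : k ≤ i := by omega
    rw [seg_of_ge hik]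
    simp only [frontLoopA]
    rw [frontLoopB]; split
    · rename_i hc; exact absurd hc.1 (by omega)
    · rw [seg_of_ge hik]
  | succ m ih =>
    intro i k loads hk hn
    by_cases hik : i < k
    · rw [seg_cons hik hk]
      simp only [frontLoopA]
      rw [frontLoopB]
      by_cases hc : a.getD i 0 + loads ≤ M
      · rw [if_pos hc, if_pos ⟨hik, hc⟩]
        exact ih (i + 1) k (loads + a.getD i 0) hk (by omega)
      · rw [if_neg hc, if_neg (fun hc2 => hc hc2.2), ← seg_cons hik hk]
    · have hik' : k ≤ i := by omega
      rw [seg_of_ge hik']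
      simp only [frontLoopA]
      rw [frontLoopB]; split
      · rename_i hc; exact absurd hc.1 (by omega)
      · rw [seg_of_ge hik']

lemma back_eq (M : Int) (a : List Int) :
    ∀ n i k loads, k ≤ a.length → k - i ≤ n →
      backLoopA M loads (seg a i k) =
        ((backLoopB M a loads i k).1, seg a i (backLoopB M a loads i k).2) := by
  intro n
  induction n with
  | zero =>
    intro i k loads hk hn
    have hik : k ≤ i := by omega
    rw [seg_of_ge hik, backLoopA]
    split
    · rw [backLoopB]; split
      · rename_i hc; exact absurd hc.1 (by omega)
      · simp [seg_of_ge hik]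
    · rename_i x heq; simp at heq
  | succ m ih =>
    intro i k loads hk hn
    by_cases hik : i < k
    · have hsnoc := seg_snoc hik hk
      have hlast : (seg a i k).getLast? = some (a.getD (k - 1) 0) := by
        rw [hsnoc]; exact List.getLast?_concat
      have hdrop : (seg a i k).dropLast = seg a i (k - 1) := by
        rw [hsnoc]; exact List.dropLast_concat
      rw [backLoopA]
      split
      · rename_i heq; rw [hlast] at heq; simp at heq
      · rename_i x heq
        have hx : x = a.getD (k - 1) 0 := by rw [hlast] at heq; exact (Option.some.inj heq).symm
        subst hx
        rw [hdrop, backLoopB]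
        by_cases hc : a.getD (k - 1) 0 + loads ≤ M
        · rw [if_pos hc, if_pos ⟨hik, hc⟩]
          exact ih i (k - 1) (loads + a.getD (k - 1) 0) (by omega) (by omega)
        · rw [if_neg hc, if_neg (fun h2 => hc h2.2)]
    · have hik' : k ≤ i := by omega
      rw [seg_of_ge hik', backLoopA]
      split
      · rw [backLoopB]; split
        · rename_i hc; exact absurd hc.1 (by omega)
        · simp [seg_of_ge hik']
      · rename_i x heq; simp at heq

lemma outer_eq (M : Int) (a : List Int) :
    ∀ fuel i k answer, i ≤ k → k ≤ a.length →
      outerA M fuel (seg a i k) answer = outerB M a fuel i k answer := by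
  intro fuel
  induction fuel with
  | zero => intro i k answer _ _; rfl
  | succ f ih =>
    intro i k answer hik hk
    by_cases h : i < k
    · have hne : seg a i k ≠ [] := by rw [seg_cons h hk]; simp
      have hfb := frontLoopB_bounds M a (k - i) i k 0 le_rfl (le_of_lt h)
      have hbb := backLoopB_bounds M a (k - (frontLoopB M a 0 i k).2)
        (frontLoopB M a 0 i k).2 k (frontLoopB M a 0 i k).1 le_rfl hfb.2
      have hf := front_eq M a (k - i) i k 0 hk le_rfl
      have hb := back_eq M a (k - (frontLoopB M a 0 i k).2) (frontLoopB M a 0 i k).2 k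
        (frontLoopB M a 0 i k).1 hk le_rfl
      simp only [outerA, outerB, if_neg hne, if_pos h, hf, hb]
      exact ih (frontLoopB M a 0 i k).2
        (backLoopB M a (frontLoopB M a 0 i k).1 (frontLoopB M a 0 i k).2 k).2
        (answer + 1) (by omega) (by omega)
    · have hik' : k ≤ i := by omega
      rw [seg_of_ge hik']
      simp [outerA, outerB, h]

-- ===== VERDICT (by name: the statement is the Claim_ definition above) =====
theorem solution_spec : Claim_equal_solution := by
  intro M load _
  unfold Spec_solution solution solution_alt
  have hseg : seg (PySem.List.sorted load (fun x => x) true) 0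
      (PySem.List.sorted load (fun x => x) true).length =
      PySem.List.sorted load (fun x => x) true := by
    simp [seg]
  have h := outer_eq M (PySem.List.sorted load (fun x => x) true)
    (PySem.List.sorted load (fun x => x) true).length 0
    (PySem.List.sorted load (fun x => x) true).length 0 (Nat.zero_le _) le_rfl
  rw [hseg] at h
  exact h
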